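-- pv_equiv track=rewrite | github.com/yshagit31/DSA | Amazon/ques2.py | findPartitionCost
-- ===== SOURCE A (Python) =====
-- def findPartitionCost(cost, k):
--     n = len(cost)
--
--     if k == 1:
--         total = cost[0] + cost[-1]
--         return [total, total]
--
--     # Step 1: Create all pair contributions between partitions
--     pair_contributions = [cost[i] + cost[i+1] for i in range(n - 1)]
--
--     # Step 2: Sort pair contributions
--     pair_contributions.sort()
--
--     # Step 3: Base cost is always cost[0] + cost[-1]
--     base = cost[0] + cost[-1]
--
--     # Step 4: Add k-1 smallest and largest pairs
--     min_cost = base + sum(pair_contributions[:k - 1])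
--     max_cost = base + sum(pair_contributions[-(k - 1):])
--
--     return [min_cost, max_cost]
-- ===== SOURCE B (Python) =====
-- def _sum_smallest(xs, j):
--     # Sum of the j smallest elements of xs (all of them if j >= len(xs), 0 if j <= 0),
--     # by iterative quickselect-style partitioning around a middle pivot.
--     acc = 0
--     while True:
--         if j <= 0:
--             return acc
--         if j >= len(xs):
--             return acc + sum(xs)
--         p = xs[len(xs) // 2]
--         lt = [x for x in xs if x < p]
--         if j <= len(lt):
--             xs = lt
--             continue
--         c = xs.count(p)
--         if j <= len(lt) + c:
--             return acc + sum(lt) + p * (j - len(lt))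
--         acc += sum(lt) + p * c
--         j -= len(lt) + c
--         xs = [x for x in xs if x > p]
--
--
-- def findPartitionCost(cost, k):
--     base = cost[0] + cost[-1]
--     pairs = [a + b for a, b in zip(cost, cost[1:])]
--     lo = base + _sum_smallest(pairs, k - 1)
--     hi = base + (sum(pairs) - _sum_smallest(pairs, len(pairs) - (k - 1)))
--     return [lo, hi]
-- ===== Notes on version B (the rewrite author's own statement) =====
-- stated objective: alternative
-- what changed: B replaces sort-then-slice by a quickselect-style partition loop that sums the k-1 smallest pair contributions directly (max side derived from the total sum), builds pairs with zip instead of indexed range, and needs no special case for k == 1.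
-- outside the precondition, e.g. on findPartitionCost([], 2): A raises IndexError, B raises IndexError; on findPartitionCost([1, 2, 3], 0): A returns [7, 9], B returns [4, 4]
import Mathlib
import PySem

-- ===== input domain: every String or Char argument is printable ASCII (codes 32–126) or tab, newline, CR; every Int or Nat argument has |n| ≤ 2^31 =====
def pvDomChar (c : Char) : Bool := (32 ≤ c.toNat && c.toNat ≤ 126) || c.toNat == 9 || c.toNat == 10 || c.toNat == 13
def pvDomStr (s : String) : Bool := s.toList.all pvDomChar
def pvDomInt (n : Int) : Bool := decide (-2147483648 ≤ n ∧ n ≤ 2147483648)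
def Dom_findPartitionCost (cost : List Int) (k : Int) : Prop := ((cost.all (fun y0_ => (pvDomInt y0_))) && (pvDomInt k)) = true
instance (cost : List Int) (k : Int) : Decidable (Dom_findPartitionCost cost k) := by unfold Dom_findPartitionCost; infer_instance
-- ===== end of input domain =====

-- B replaces sort-then-slice by an iterative quickselect-style partition that sums the
-- j smallest pair contributions directly (and derives the max side from the total sum).

-- ===== PORT A =====
def findPartitionCost (cost : List Int) (k : Int) : List Int :=
  let n : Int := cost.length
  if k == 1 then
    -- cost[0] + cost[-1]; IndexError on empty cost is excluded by Pre_
    let total := (PySem.List.pyGet? cost 0).getD 0 + (PySem.List.pyGet? cost (-1)).getD 0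
    [total, total]
  else
    let pc := (PySem.List.pyRange 0 (n - 1) 1).map
      (fun i => (PySem.List.pyGet? cost i).getD 0 + (PySem.List.pyGet? cost (i + 1)).getD 0)
    let pcs := PySem.List.sorted pc (fun x => x) false
    let base := (PySem.List.pyGet? cost 0).getD 0 + (PySem.List.pyGet? cost (-1)).getD 0
    let minCost := base + (PySem.List.slice pcs none (some (k - 1))).sum
    let maxCost := base + (PySem.List.slice pcs (some (-(k - 1))) none).sum
    [minCost, maxCost]

-- ===== PORT B =====
-- termination helpers cited by sumSmallestAux's decreasing_by
theorem pv_pivot_mem (xs : List Int) (h : 0 < xs.length) : xs.getD (xs.length / 2) 0 ∈ xs := by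
  have hlt : xs.length / 2 < xs.length := by omega
  rw [List.getD_eq_getElem xs 0 hlt]
  exact List.getElem_mem _

theorem pv_filter_lt (xs : List Int) (q : Int → Bool) (x : Int) (hx : x ∈ xs)
    (hq : q x = false) : (xs.filter q).length < xs.length :=
  List.length_filter_lt_length_iff_exists.mpr ⟨x, hx, by simp [hq]⟩

-- Source B's _sum_smallest: iterative quickselect-style loop, here as the obvious
-- well-founded recursion on the shrinking list (each step keeps strictly fewer elements).
def sumSmallestAux (xs : List Int) (j : Int) (acc : Int) : Int :=
  if j ≤ 0 then acc
  else if (xs.length : Int) ≤ j then acc + xs.sum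
  else
    let p := xs.getD (xs.length / 2) 0   -- xs[len(xs)//2]: index always in range here
    let lt := xs.filter (fun x => x < p)
    if j ≤ (lt.length : Int) then sumSmallestAux lt j acc
    else
      let c : Int := PySem.List.count xs p
      if j ≤ (lt.length : Int) + c then acc + lt.sum + p * (j - lt.length)
      else sumSmallestAux (xs.filter (fun x => p < x)) (j - lt.length - c)
             (acc + lt.sum + p * c)
termination_by xs.length
decreasing_by
  · rw [List.unattach_filter (g := fun y => decide (y < xs.getD (xs.length / 2) 0))
        (hf := fun x h => rfl), List.unattach_attach]
    exact pv_filter_lt _ _ _ (pv_pivot_mem xs (by omega)) (by simp)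
  · rw [List.unattach_filter (g := fun y => decide (xs.getD (xs.length / 2) 0 < y))
        (hf := fun x h => rfl), List.unattach_attach]
    exact pv_filter_lt _ _ _ (pv_pivot_mem xs (by omega)) (by simp)

def findPartitionCost_alt (cost : List Int) (k : Int) : List Int :=
  let base := (PySem.List.pyGet? cost 0).getD 0 + (PySem.List.pyGet? cost (-1)).getD 0
  let pairs := List.zipWith (· + ·) cost (PySem.List.slice cost (some 1) none)
  let lo := base + sumSmallestAux pairs (k - 1) 0
  let hi := base + (pairs.sum - sumSmallestAux pairs ((pairs.length : Int) - (k - 1)) 0)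
  [lo, hi]

-- ===== PRECONDITION & SPEC =====
-- Pre_ excludes empty cost (A raises IndexError) and non-positive k in the band
-- 2 - len(cost) < k ≤ 0, where A's negative slice bounds yield accidental values
-- (a "min" above its "max") for a meaningless partition count.
def Pre_findPartitionCost (cost : List Int) (k : Int) : Prop :=
  cost ≠ [] ∧ (1 ≤ k ∨ k ≤ 2 - (cost.length : Int))
instance (cost : List Int) (k : Int) : Decidable (Pre_findPartitionCost cost k) := by
  unfold Pre_findPartitionCost; infer_instance

def pvWitness_findPartitionCost : List Int × Int := ([1, 2, 3], 2)

def Spec_findPartitionCost (cost : List Int) (k : Int) (out : List Int) : Prop := out = findPartitionCost_alt cost k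
instance (cost : List Int) (k : Int) (out : List Int) : Decidable (Spec_findPartitionCost cost k out) := by unfold Spec_findPartitionCost; infer_instance

-- ===== CLAIM (what is proved, stated in full; the proofs are below) =====
def Claim_equal_findPartitionCost : Prop := ∀ (cost : List Int) (k : Int), Dom_findPartitionCost cost k → Pre_findPartitionCost cost k → Spec_findPartitionCost cost k (findPartitionCost cost k)

-- ===== LEMMAS AND PROOFS =====

theorem pv_count_eq (xs : List Int) (v : Int) : PySem.List.count xs v = List.count v xs := rfl

-- The two ways of building the pair list agree.
theorem pairs_eq (cost : List Int) :
    (PySem.List.pyRange 0 ((cost.length : Int) - 1) 1).map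
      (fun i => (PySem.List.pyGet? cost i).getD 0 + (PySem.List.pyGet? cost (i + 1)).getD 0)
    = List.zipWith (· + ·) cost (PySem.List.slice cost (some 1) none) := by
  rw [PySem.List.slice_from_one, PySem.List.pyRange_one]
  apply List.ext_getElem
  · simp [List.length_zipWith]
  · intro i h1 h2
    simp only [List.getElem_map, List.getElem_range, List.getElem_zipWith]
    have hi : i + 1 < cost.length := by
      simp at h1; omega
    have h0 : ((0 : Int) + (i : Nat)) = ((i : Nat) : Int) := by ring
    have h1' : ((0 : Int) + (i : Nat)) + 1 = (((i + 1 : Nat)) : Int) := by push_cast; ring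
    rw [h1', h0, PySem.List.pyGet?_natCast, PySem.List.pyGet?_natCast]
    rw [List.getElem?_eq_getElem (by omega), List.getElem?_eq_getElem hi]
    simp [List.getElem_tail]

-- sorted splits at a pivot into (< p) ++ (= p) ++ (> p).
theorem sorted_split (xs : List Int) (p : Int) :
    PySem.List.sorted xs (fun x => x) false
      = PySem.List.sorted (xs.filter (fun x => x < p)) (fun x => x) false
        ++ List.replicate (xs.count p) p
        ++ PySem.List.sorted (xs.filter (fun x => p < x)) (fun x => x) false := by
  apply PySem.List.sorted_id_eq_of_perm_of_pairwise
  · -- permutation with xs, by counting each value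
    rw [List.perm_iff_count]
    intro a
    have h1 := PySem.List.sorted_perm (xs.filter (fun x => x < p)) (fun x => x) false
    have h2 := PySem.List.sorted_perm (xs.filter (fun x => p < x)) (fun x => x) false
    simp only [List.count_append, h1.count_eq, h2.count_eq, List.count_replicate]
    have hz : ∀ q : Int → Bool, q a = false → List.count a (xs.filter q) = 0 := by
      intro q hq
      rw [List.count_eq_zero]
      intro hmem
      rw [List.mem_filter] at hmem
      rw [hq] at hmem
      exact Bool.false_ne_true hmem.2
    rcases lt_trichotomy a p with h | h | h
    · rw [hz (fun x => decide (p < x)) (by simp [not_lt.mpr (le_of_lt h)]),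
          List.count_filter (by simp [h])]
      simp [(ne_of_lt h).symm]
    · subst h
      rw [hz (fun x => decide (x < a)) (by simp), hz (fun x => decide (a < x)) (by simp)]
      simp
    · rw [hz (fun x => decide (x < p)) (by simp [not_lt.mpr (le_of_lt h)]),
          List.count_filter (by simp [h])]
      simp [(ne_of_gt h).symm]
  · -- the concatenation is ≤-ordered
    have plt := PySem.List.sorted_pairwise (xs.filter (fun x => x < p)) (fun x => x)
    have pgt := PySem.List.sorted_pairwise (xs.filter (fun x => p < x)) (fun x => x)
    have mlt : ∀ a ∈ PySem.List.sorted (xs.filter (fun x => x < p)) (fun x => x) false,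
        a < p := by
      intro a ha
      rw [PySem.List.mem_sorted, List.mem_filter] at ha
      simpa using ha.2
    have mgt : ∀ a ∈ PySem.List.sorted (xs.filter (fun x => p < x)) (fun x => x) false,
        p < a := by
      intro a ha
      rw [PySem.List.mem_sorted, List.mem_filter] at ha
      simpa using ha.2
    rw [List.append_assoc, List.pairwise_append]
    refine ⟨plt, ?_, ?_⟩
    · rw [List.pairwise_append]
      refine ⟨List.pairwise_replicate.mpr (Or.inr le_rfl), pgt, ?_⟩
      intro a ha b hb
      rw [List.eq_of_mem_replicate ha]
      exact le_of_lt (mgt b hb)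
    · intro a ha b hb
      rcases List.mem_append.mp hb with hb | hb
      · rw [List.eq_of_mem_replicate hb]
        exact le_of_lt (mlt a ha)
      · exact le_of_lt (lt_trans (mlt a ha) (mgt b hb))

theorem take_three {α : Type} (A B C : List α) (m : Nat) :
    (A ++ (B ++ C)).take m
      = A.take m ++ (B.take (m - A.length) ++ C.take (m - A.length - B.length)) := by
  rw [List.take_append, List.take_append, Nat.sub_sub]

-- sumSmallestAux computes acc + the sum of the j smallest elements.
theorem sumSmallestAux_eq (xs : List Int) (j acc : Int) :
    sumSmallestAux xs j acc
      = acc + ((PySem.List.sorted xs (fun x => x) false).take j.toNat).sum := by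
  induction hn : xs.length using Nat.strong_induction_on generalizing xs j acc with
  | _ n ih =>
  subst hn
  rw [sumSmallestAux]
  dsimp only
  split_ifs with h1 h2 h3 h4
  · -- j ≤ 0
    rw [Int.toNat_of_nonpos h1]
    simp
  · -- len(xs) ≤ j : take everything
    rw [List.take_of_length_le (by rw [PySem.List.length_sorted]; omega),
        (PySem.List.sorted_perm xs (fun x => x) false).sum_eq]
  · -- recurse into the < p part
    set p := xs.getD (xs.length / 2) 0 with hp
    have hpmem : p ∈ xs := pv_pivot_mem xs (by omega)
    rw [ih _ (pv_filter_lt xs _ _ hpmem (by simp)) _ _ _ rfl]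
    rw [sorted_split xs p, List.append_assoc,
        List.take_append_of_le_length (by rw [PySem.List.length_sorted]; omega)]
  · -- answer straddles the pivot block
    set p := xs.getD (xs.length / 2) 0 with hp
    have hc : (PySem.List.count xs p : Int) = (List.count p xs : Int) := by rw [pv_count_eq]
    rw [hc] at h4
    set lt := xs.filter (fun x => x < p) with hltdef
    set Slt := PySem.List.sorted lt (fun x => x) false with hSlt
    set Sgt := PySem.List.sorted (xs.filter (fun x => p < x)) (fun x => x) false with hSgt
    have hlen1 : Slt.length = lt.length := by rw [hSlt, PySem.List.length_sorted]
    have e1 : Slt.take j.toNat = Slt := List.take_of_length_le (by rw [hlen1]; omega)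
    have e2 : (List.replicate (List.count p xs) p).take (j.toNat - Slt.length)
        = List.replicate (j.toNat - lt.length) p := by
      rw [List.take_replicate, hlen1, Nat.min_eq_left (by omega)]
    have e3 : Sgt.take (j.toNat - Slt.length - (List.replicate (List.count p xs) p).length)
        = [] := by
      rw [List.length_replicate, hlen1]
      have h0 : j.toNat - lt.length - List.count p xs = 0 := by omega
      rw [h0, List.take_zero]
    rw [sorted_split xs p, ← hltdef, ← hSlt, ← hSgt, List.append_assoc, take_three, e1, e2, e3]
    have hsum : Slt.sum = lt.sum := (PySem.List.sorted_perm lt (fun x => x) false).sum_eq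
    rw [List.sum_append, List.sum_append, hsum, List.sum_replicate, List.sum_nil, nsmul_eq_mul]
    have hcast : ((j.toNat - lt.length : Nat) : Int) = j - lt.length := by omega
    rw [hcast]
    ring
  · -- recurse into the > p part
    set p := xs.getD (xs.length / 2) 0 with hp
    have hpmem : p ∈ xs := pv_pivot_mem xs (by omega)
    have hc : (PySem.List.count xs p : Int) = (List.count p xs : Int) := by rw [pv_count_eq]
    rw [hc] at h4 ⊢
    rw [ih _ (pv_filter_lt xs _ _ hpmem (by simp)) _ _ _ rfl]
    set lt := xs.filter (fun x => x < p) with hltdef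
    set Slt := PySem.List.sorted lt (fun x => x) false with hSlt
    set Sgt := PySem.List.sorted (xs.filter (fun x => p < x)) (fun x => x) false with hSgt
    have hlen1 : Slt.length = lt.length := by rw [hSlt, PySem.List.length_sorted]
    have e1 : Slt.take j.toNat = Slt := List.take_of_length_le (by rw [hlen1]; omega)
    have e2 : (List.replicate (List.count p xs) p).take (j.toNat - Slt.length)
        = List.replicate (List.count p xs) p :=
      List.take_of_length_le (by rw [List.length_replicate, hlen1]; omega)
    have harg : j.toNat - Slt.length - (List.replicate (List.count p xs) p).length
        = (j - (lt.length : Int) - (List.count p xs : Int)).toNat := by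
      rw [List.length_replicate, hlen1]
      omega
    rw [sorted_split xs p, ← hltdef, ← hSlt, ← hSgt, List.append_assoc, take_three, e1, e2, harg]
    have hsum : Slt.sum = lt.sum := (PySem.List.sorted_perm lt (fun x => x) false).sum_eq
    rw [List.sum_append, List.sum_append, hsum, List.sum_replicate, nsmul_eq_mul]
    ring

-- ===== VERDICT (by name: the statement is the Claim_ definition above) =====
theorem findPartitionCost_spec : Claim_equal_findPartitionCost := by
  intro cost k hdom hpre
  obtain ⟨hne, hk⟩ := hpre
  unfold Spec_findPartitionCost findPartitionCost findPartitionCost_alt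
  dsimp only
  rw [pairs_eq]
  set base := (PySem.List.pyGet? cost 0).getD 0 + (PySem.List.pyGet? cost (-1)).getD 0 with hbase
  set pairs := List.zipWith (· + ·) cost (PySem.List.slice cost (some 1) none) with hpairs
  set pcs := PySem.List.sorted pairs (fun x => x) false with hpcs
  have hlen : pcs.length = pairs.length := by rw [hpcs, PySem.List.length_sorted]
  have hsum : pcs.sum = pairs.sum := (PySem.List.sorted_perm pairs (fun x => x) false).sum_eq
  rw [sumSmallestAux_eq, sumSmallestAux_eq, ← hpcs]
  have hm : pairs.length = cost.length - 1 := by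
    rw [hpairs, PySem.List.slice_from_one]
    simp [List.length_zipWith]
  by_cases hk1 : 1 ≤ k
  swap
  · -- 2 - len(cost) ≥ k and k ≤ 0: both sides degenerate to [base, base]
    have hklow : k ≤ 2 - (cost.length : Int) := hk.resolve_left hk1
    have hlc : 1 ≤ cost.length := List.length_pos_iff.mpr hne
    rw [if_neg (by simp; omega)]
    -- first the B side, while (k - 1) is still visible there
    have hlo : (k - 1).toNat = 0 := by omega
    have hhifull : List.take ((pairs.length : Int) - (k - 1)).toNat pcs = pcs :=
      List.take_of_length_le (by omega)
    rw [hlo, List.take_zero, hhifull, hsum]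
    -- then A's two empty slices
    have hb : k - 1 = -((((1 - k).toNat : Nat)) : Int) := by omega
    rw [hb, PySem.List.slice_to_neg_natCast pcs _ (by omega)]
    have hz : pcs.length - (1 - k).toNat = 0 := by omega
    rw [hz, List.take_zero]
    have hneg2 : -(-((((1 - k).toNat : Nat)) : Int)) = (((1 - k).toNat : Nat) : Int) := by ring
    rw [hneg2, PySem.List.slice_from pcs (by omega)]
    have hdrop : pcs.drop (((1 - k).toNat : Int)).toNat = [] :=
      List.drop_eq_nil_of_le (by omega)
    rw [hdrop]
    norm_num
  by_cases h1 : k = 1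
  · subst h1
    rw [if_pos (by decide)]
    have ht0 : ((1 : Int) - 1).toNat = 0 := by decide
    have htfull : List.take ((pairs.length : Int) - (1 - 1)).toNat pcs = pcs :=
      List.take_of_length_le (by omega)
    rw [ht0, htfull, List.take_zero, hsum]
    norm_num
  · have hk2 : 2 ≤ k := by omega
    rw [if_neg (by simp [h1])]
    rw [PySem.List.slice_to pcs (by omega : (0:Int) ≤ k - 1)]
    have hneg : -(k - 1) = -((((k - 1).toNat : Nat)) : Int) := by omega
    rw [hneg, PySem.List.slice_from_neg_natCast pcs ((k - 1).toNat) (by omega)]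
    have hsplit := List.sum_take_add_sum_drop pcs (pcs.length - (k - 1).toNat)
    have htn : ((pairs.length : Int) - (k - 1)).toNat = pcs.length - (k - 1).toNat := by
      omega
    rw [htn]
    simp only [List.cons.injEq, and_true]
    constructor
    · ring
    · omega
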